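-- pv_equiv track=rewrite | github.com/Natneam/competitive-programming | a2sv camp problems contests and more/Contests/A2SV - Africa to Silicon Valley - Fall Camp 2021 Contest 11/C. Frog Jumps.py | solve
-- ===== SOURCE A (Python) =====
-- def solve(string):
--     start_index = 0
--     length = 0
--     for i in range(len(string)):
--         if string[i] == 'R':
--             length = max(length, i - start_index)
--             start_index = i
--     return length
-- ===== SOURCE B (Python) =====
-- def solve(string):
--     parts = string.split('R')
--     if len(parts) == 1:
--         return 0
--     best = len(parts[0])
--     for seg in parts[1:-1]:
--         best = max(best, len(seg) + 1)
--     return best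
-- ===== Notes on version B (the rewrite author's own statement) =====
-- stated objective: faster
-- what changed: B splits the string on the marker character and derives the answer from segment lengths (first segment length, then len+1 for each inner segment, ignoring the tail), instead of A's per-character indexed scan carrying start_index/length.
import Mathlib
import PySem

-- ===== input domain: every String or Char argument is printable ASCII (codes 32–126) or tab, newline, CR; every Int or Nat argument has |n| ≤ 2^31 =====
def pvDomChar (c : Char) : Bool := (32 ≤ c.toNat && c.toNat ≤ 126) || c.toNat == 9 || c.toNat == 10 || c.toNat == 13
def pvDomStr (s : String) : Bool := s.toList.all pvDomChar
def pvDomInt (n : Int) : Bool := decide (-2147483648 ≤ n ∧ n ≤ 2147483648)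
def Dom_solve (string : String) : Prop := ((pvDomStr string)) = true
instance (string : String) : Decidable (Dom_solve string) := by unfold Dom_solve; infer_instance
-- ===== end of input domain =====

-- B replaces A's indexed scan (start_index/length) by splitting the string on 'R' and
-- reading the answer off the segment lengths; same O(n) cost, different decomposition.

-- ===== PORT A =====
-- A: for i in range(len(string)): if string[i]=='R': length = max(length, i-start_index); start_index = i
def solve (string : String) : Int :=
  (PySem.List.enumerate string.toList).foldl
    (fun (p : Int × Int) ic =>
      if ic.2 = 'R' then (ic.1, max p.2 (ic.1 - p.1)) else p)
    (0, 0) |>.2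

-- ===== PORT B =====
-- B: parts = string.split('R') (= List.splitOn 'R', the corresponding Lean function);
--    answer = max of len(parts[0]) and len(seg)+1 for the inner segments parts[1:-1].
def solve_alt (string : String) : Int :=
  let parts := string.toList.splitOn 'R'
  if parts.length = 1 then 0
  else
    ((parts.drop 1).dropLast).foldl
      (fun b seg => max b ((seg.length : Int) + 1))
      ((parts.headD []).length : Int)

-- ===== PRECONDITION & SPEC =====
def Spec_solve (string : String) (out : Int) : Prop := out = solve_alt string
instance (string : String) (out : Int) : Decidable (Spec_solve string out) := by unfold Spec_solve; infer_instance

-- ===== CLAIM (what is proved, stated in full; the proofs are below) =====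
def Claim_equal_solve : Prop := ∀ (string : String), Dom_solve string → Spec_solve string (solve string)

-- ===== LEMMAS AND PROOFS =====

-- B's inner-segment loop, as a recursion: process all but the last segment.
def pvH (segs : List (List Char)) (b : Int) : Int :=
  match segs with
  | [] => b
  | [_] => b
  | x :: y :: r => pvH (y :: r) (max b ((x.length : Int) + 1))

theorem pvH_eq_foldl (segs : List (List Char)) (b : Int) :
    pvH segs b = segs.dropLast.foldl (fun b seg => max b ((seg.length : Int) + 1)) b := by
  induction segs generalizing b with
  | nil => simp [pvH]
  | cons x t ih =>
    cases t with
    | nil => simp [pvH]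
    | cons y r => simp [pvH, ih]

-- The key invariant: A's fold over the enumerated tail, from state (s, len) with the
-- next character carrying index i, computed via the splitOn-'R' decomposition of the tail.
theorem pv_key (l : List Char) : ∀ (i s len : Int),
    ((PySem.List.enumerate l i).foldl
       (fun (p : Int × Int) ic =>
         if ic.2 = 'R' then (ic.1, max p.2 (ic.1 - p.1)) else p)
       (s, len)).2
    = match l.splitOn 'R' with
      | [_] => len
      | s0 :: rest => pvH rest (max len (i + (s0.length : Int) - s))
      | [] => len := by
  induction l with
  | nil => intro i s len; simp [PySem.List.enumerate_nil, List.splitOn, List.splitOnP_nil]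
  | cons c t ih =>
    intro i s len
    rw [PySem.List.enumerate_cons]
    by_cases hc : c = 'R'
    · have hsplit : (c :: t).splitOn 'R' = [] :: t.splitOn 'R' := by
        simp [List.splitOn, List.splitOnP_cons, hc]
      rw [hsplit]
      simp only [List.foldl_cons, if_pos hc]
      rw [ih (i + 1) i (max len (i - s))]
      rcases h : t.splitOn 'R' with _ | ⟨u, rest⟩
      · exact absurd h (by simp [List.splitOn]; exact List.splitOnP_ne_nil _ _)
      · cases rest with
        | nil =>
          simp [pvH]
        | cons v r =>
          simp only [pvH]
          congr 1
          simp only [List.length_nil]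
          push_cast
          omega
    · have hsplit : (c :: t).splitOn 'R' = (t.splitOn 'R').modifyHead (c :: ·) := by
        simp [List.splitOn, List.splitOnP_cons, hc]
      rw [hsplit]
      simp only [List.foldl_cons, if_neg hc]
      rw [ih (i + 1) s len]
      rcases h : t.splitOn 'R' with _ | ⟨u, rest⟩
      · exact absurd h (by simp [List.splitOn]; exact List.splitOnP_ne_nil _ _)
      · cases rest with
        | nil => simp [List.modifyHead]
        | cons v r =>
          simp only [List.modifyHead]
          congr 1
          simp only [List.length_cons]
          push_cast
          omega

-- ===== VERDICT (by name: the statement is the Claim_ definition above) =====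
theorem solve_spec : Claim_equal_solve := by
  intro string _
  unfold Spec_solve solve solve_alt
  rw [pv_key string.toList 0 0 0]
  rcases h : string.toList.splitOn 'R' with _ | ⟨u, rest⟩
  · exact absurd h (by simp [List.splitOn]; exact List.splitOnP_ne_nil _ _)
  · cases rest with
    | nil => simp
    | cons v r =>
      have hlen : (u :: v :: r).length ≠ 1 := by simp
      simp only [if_neg hlen]
      rw [pvH_eq_foldl]
      simp
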